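-- pv_equiv track=rewrite | github.com/barrel-0314/ECIF | test.py | get_test_filter_c_2p
-- ===== SOURCE A (Python) =====
-- def get_test_filter_c_2p(train_answers_1p_e, test_answers_2p_c, is_dict_train):
--     ret = {}
--     for query_test in test_answers_2p_c:
--         filters = set()
--         answers_1 = train_answers_1p_e.get((query_test[0], query_test[1]), set())
--         for answer_1 in answers_1:
--             answers_2 = train_answers_1p_e.get((answer_1, query_test[2]), set())
--             for answer_2 in answers_2:
--                 concepts = is_dict_train.get(answer_2, set())
--                 for concept in concepts:
--                     filters.add(concept)
--         ret[query_test] = filters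
--     return ret
-- ===== SOURCE B (Python) =====
-- def get_test_filter_c_2p(train_answers_1p_e, test_answers_2p_c, is_dict_train):
--     # Memoized two-hop join: cache the concept list per (entity, relation) hop,
--     # and compute each distinct query only once.
--     ret = {}
--     cache = {}
--     for q in test_answers_2p_c:
--         if q in ret:
--             continue
--         filters = set()
--         for a1 in train_answers_1p_e.get((q[0], q[1]), ()):
--             key = (a1, q[2])
--             if key not in cache:
--                 cache[key] = [c
--                               for a2 in train_answers_1p_e.get(key, ())
--                               for c in is_dict_train.get(a2, ())]
--             filters.update(cache[key])
--         ret[q] = filters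
--     return ret
-- ===== Notes on version B (the rewrite author's own statement) =====
-- stated objective: alternative
-- what changed: B memoizes the second-hop concept list per (entity, relation) pair in a dictionary and skips queries already answered, so repeated second hops and duplicate queries are looked up instead of rescanned.
import Mathlib
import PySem

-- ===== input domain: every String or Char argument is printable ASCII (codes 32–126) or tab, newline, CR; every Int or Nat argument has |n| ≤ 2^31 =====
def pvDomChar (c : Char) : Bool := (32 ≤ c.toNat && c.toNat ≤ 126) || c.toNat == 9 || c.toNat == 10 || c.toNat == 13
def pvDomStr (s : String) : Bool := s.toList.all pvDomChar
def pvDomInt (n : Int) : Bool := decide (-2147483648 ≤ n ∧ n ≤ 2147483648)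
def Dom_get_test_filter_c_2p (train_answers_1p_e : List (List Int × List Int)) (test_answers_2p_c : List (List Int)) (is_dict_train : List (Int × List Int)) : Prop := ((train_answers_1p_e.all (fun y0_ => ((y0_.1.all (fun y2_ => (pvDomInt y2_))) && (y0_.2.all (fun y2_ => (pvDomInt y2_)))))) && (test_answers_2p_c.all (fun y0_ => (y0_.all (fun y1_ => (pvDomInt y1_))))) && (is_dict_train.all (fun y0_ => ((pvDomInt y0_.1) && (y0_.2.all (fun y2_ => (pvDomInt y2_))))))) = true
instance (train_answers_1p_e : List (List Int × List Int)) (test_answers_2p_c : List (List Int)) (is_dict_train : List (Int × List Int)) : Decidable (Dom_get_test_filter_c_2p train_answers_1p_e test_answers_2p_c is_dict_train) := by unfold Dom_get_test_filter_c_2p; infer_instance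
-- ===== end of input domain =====

-- B memoizes the second-hop concept list per (entity, relation) pair and skips already-answered
-- queries instead of recomputing them (objective: alternative).

-- ===== PORT A =====
def get_test_filter_c_2p (train_answers_1p_e : List (List Int × List Int)) (test_answers_2p_c : List (List Int)) (is_dict_train : List (Int × List Int)) : List (List Int × List Int) :=
  (test_answers_2p_c.foldl (fun (ret : PySem.Dict (List Int) (List Int)) query_test =>
      let q0 := PySem.List.pyGetD query_test 0 0
      let q1 := PySem.List.pyGetD query_test 1 0
      let q2 := PySem.List.pyGetD query_test 2 0
      let answers_1 := (PySem.Dict.mk train_answers_1p_e).getD [q0, q1] []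
      let filters : PySem.Set Int :=
        answers_1.foldl (fun filters answer_1 =>
          let answers_2 := (PySem.Dict.mk train_answers_1p_e).getD [answer_1, q2] []
          answers_2.foldl (fun filters answer_2 =>
            let concepts := (PySem.Dict.mk is_dict_train).getD answer_2 []
            concepts.foldl (fun f concept => PySem.Set.add f concept) filters) filters)
          PySem.Set.empty
      ret.insert query_test filters)
    PySem.Dict.empty).items

-- ===== PORT B =====
def get_test_filter_c_2p_alt (train_answers_1p_e : List (List Int × List Int)) (test_answers_2p_c : List (List Int)) (is_dict_train : List (Int × List Int)) : List (List Int × List Int) :=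
  (test_answers_2p_c.foldl (fun (st : PySem.Dict (List Int) (List Int) × PySem.Dict (List Int) (List Int)) q =>
      if st.1.contains q then st
      else
        let q2 := PySem.List.pyGetD q 2 0
        let inner := ((PySem.Dict.mk train_answers_1p_e).getD [PySem.List.pyGetD q 0 0, PySem.List.pyGetD q 1 0] []).foldl
          (fun (p : PySem.Set Int × PySem.Dict (List Int) (List Int)) a1 =>
            let key := [a1, q2]
            let cache := if p.2.contains key then p.2
              else p.2.insert key (((PySem.Dict.mk train_answers_1p_e).getD key []).flatMap
                                     (fun a2 => (PySem.Dict.mk is_dict_train).getD a2 []))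
            (PySem.Set.update p.1 (cache.getD key []), cache))
          (PySem.Set.empty, st.2)
        (st.1.insert q inner.1, inner.2))
    (PySem.Dict.empty, PySem.Dict.empty)).1.items

-- ===== PRECONDITION & SPEC =====
-- Pre_ excludes exactly the inputs on which the Python A raises IndexError: a query with fewer
-- than two components, or with exactly two components whose first-hop lookup is nonempty
-- (query_test[2] is read only inside the loop over those first-hop answers).
def Pre_get_test_filter_c_2p (train_answers_1p_e : List (List Int × List Int)) (test_answers_2p_c : List (List Int)) (is_dict_train : List (Int × List Int)) : Prop :=
  ∀ q ∈ test_answers_2p_c, 2 ≤ q.length ∧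
    (3 ≤ q.length ∨
      (PySem.Dict.mk train_answers_1p_e).getD [PySem.List.pyGetD q 0 0, PySem.List.pyGetD q 1 0] [] = [])
instance (train_answers_1p_e : List (List Int × List Int)) (test_answers_2p_c : List (List Int)) (is_dict_train : List (Int × List Int)) : Decidable (Pre_get_test_filter_c_2p train_answers_1p_e test_answers_2p_c is_dict_train) := by unfold Pre_get_test_filter_c_2p; infer_instance

def pvWitness_get_test_filter_c_2p : (List (List Int × List Int)) × List (List Int) × (List (Int × List Int)) :=
  ([([1, 2], [3]), ([3, 5], [4])], [[1, 2, 5]], [(4, [7, 8])])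

def Spec_get_test_filter_c_2p (train_answers_1p_e : List (List Int × List Int)) (test_answers_2p_c : List (List Int)) (is_dict_train : List (Int × List Int)) (out : List (List Int × List Int)) : Prop := out = get_test_filter_c_2p_alt train_answers_1p_e test_answers_2p_c is_dict_train
instance (train_answers_1p_e : List (List Int × List Int)) (test_answers_2p_c : List (List Int)) (is_dict_train : List (Int × List Int)) (out : List (List Int × List Int)) : Decidable (Spec_get_test_filter_c_2p train_answers_1p_e test_answers_2p_c is_dict_train out) := by unfold Spec_get_test_filter_c_2p; infer_instance

-- ===== CLAIM (what is proved, stated in full; the proofs are below) =====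
def Claim_equal_get_test_filter_c_2p : Prop := ∀ (train_answers_1p_e : List (List Int × List Int)) (test_answers_2p_c : List (List Int)) (is_dict_train : List (Int × List Int)), Dom_get_test_filter_c_2p train_answers_1p_e test_answers_2p_c is_dict_train → Pre_get_test_filter_c_2p train_answers_1p_e test_answers_2p_c is_dict_train → Spec_get_test_filter_c_2p train_answers_1p_e test_answers_2p_c is_dict_train (get_test_filter_c_2p train_answers_1p_e test_answers_2p_c is_dict_train)

-- ===== LEMMAS AND PROOFS =====

-- concept list reachable from one second hop (entity a1, relation q2), duplicates kept
def pvCsL (tr : List (List Int × List Int)) (isd : List (Int × List Int)) (a1 q2 : Int) : List Int :=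
  ((PySem.Dict.mk tr).getD [a1, q2] []).flatMap (fun a2 => (PySem.Dict.mk isd).getD a2 [])

-- the per-query filter set A computes
def pvFA (tr : List (List Int × List Int)) (isd : List (Int × List Int)) (q : List Int) : PySem.Set Int :=
  PySem.Set.update PySem.Set.empty
    (((PySem.Dict.mk tr).getD [PySem.List.pyGetD q 0 0, PySem.List.pyGetD q 1 0] []).flatMap
      (fun a1 => pvCsL tr isd a1 (PySem.List.pyGetD q 2 0)))

-- cache invariant for B
def pvInvC (tr : List (List Int × List Int)) (isd : List (Int × List Int)) (cache : PySem.Dict (List Int) (List Int)) : Prop :=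
  ∀ x y v, cache.get? [x, y] = some v → v = pvCsL tr isd x y

lemma pv_foldl_update {α : Type} (g : α → List Int) :
    ∀ (l : List α) (s : PySem.Set Int),
      l.foldl (fun s x => PySem.Set.update s (g x)) s = PySem.Set.update s (l.flatMap g) := by
  intro l
  induction l with
  | nil => intro s; rfl
  | cons x xs ih =>
      intro s
      show xs.foldl _ (PySem.Set.update s (g x)) = PySem.Set.update s (g x ++ xs.flatMap g)
      rw [ih]
      show _ = (g x ++ xs.flatMap g).foldl PySem.Set.add s
      rw [List.foldl_append]
      rfl

lemma pv_insert_same {d : PySem.Dict (List Int) (List Int)} {k : List Int} {v : List Int}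
    (hn : d.keys.Nodup) (h : d.get? k = some v) : d.insert k v = d := by
  have hc : d.contains k = true := by
    rw [PySem.Dict.contains_eq_isSome_get?, h]; rfl
  apply PySem.Dict.ext
  rw [PySem.Dict.items_insert_of_contains _ _ hc]
  have : ∀ p ∈ d.items, (if p.1 == k then (k, v) else p) = p := by
    intro p hp
    by_cases hk : p.1 == k
    · have hk' : p.1 = k := by simpa using hk
      have hg : d.get? p.1 = some p.2 := PySem.Dict.get?_of_mem_items d hp hn
      rw [hk', h] at hg
      have hv2 : v = p.2 := Option.some.inj hg
      rw [if_pos hk, ← hk', hv2]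
    · simp [hk]
  rw [List.map_congr_left this]
  simp

-- B's inner fold computes A's per-query set and preserves the cache invariant
lemma pv_inner (tr : List (List Int × List Int)) (isd : List (Int × List Int)) (q2 : Int) :
    ∀ (l : List Int) (s : PySem.Set Int) (cache : PySem.Dict (List Int) (List Int)),
      pvInvC tr isd cache →
      (l.foldl (fun (p : PySem.Set Int × PySem.Dict (List Int) (List Int)) a1 =>
          let key := [a1, q2]
          let cache := if p.2.contains key then p.2
            else p.2.insert key (((PySem.Dict.mk tr).getD key []).flatMap
                                   (fun a2 => (PySem.Dict.mk isd).getD a2 []))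
          (PySem.Set.update p.1 (cache.getD key []), cache))
        (s, cache)).1 = PySem.Set.update s (l.flatMap (fun a1 => pvCsL tr isd a1 q2))
      ∧ pvInvC tr isd
        (l.foldl (fun (p : PySem.Set Int × PySem.Dict (List Int) (List Int)) a1 =>
          let key := [a1, q2]
          let cache := if p.2.contains key then p.2
            else p.2.insert key (((PySem.Dict.mk tr).getD key []).flatMap
                                   (fun a2 => (PySem.Dict.mk isd).getD a2 []))
          (PySem.Set.update p.1 (cache.getD key []), cache))
        (s, cache)).2 := by
  intro l
  induction l with
  | nil =>
      intro s cache hC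
      constructor
      · rfl
      · exact hC
  | cons a1 rest ih =>
      intro s cache hC
      simp only [List.foldl_cons]
      by_cases hmem : cache.contains [a1, q2]
      · -- cached hit
        have hsome : ∃ v, cache.get? [a1, q2] = some v := by
          rw [PySem.Dict.contains_eq_isSome_get?] at hmem
          exact Option.isSome_iff_exists.mp hmem
        obtain ⟨v, hv⟩ := hsome
        have hveq : v = pvCsL tr isd a1 q2 := hC a1 q2 v hv
        have hgd : cache.getD [a1, q2] [] = pvCsL tr isd a1 q2 := by
          rw [PySem.Dict.getD_eq_get?_getD, hv, Option.getD_some, hveq]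
        simp only [hmem, if_pos, hgd]
        obtain ⟨h1, h2⟩ := ih (PySem.Set.update s (pvCsL tr isd a1 q2)) cache hC
        refine ⟨?_, h2⟩
        rw [h1]
        show _ = PySem.Set.update s (pvCsL tr isd a1 q2 ++ rest.flatMap _)
        show _ = (pvCsL tr isd a1 q2 ++ rest.flatMap _).foldl PySem.Set.add s
        rw [List.foldl_append]
        rfl
      · -- miss: insert into cache
        have hmem' : cache.contains [a1, q2] = false := by simpa using hmem
        simp only [hmem', Bool.false_eq_true, if_false]
        set cache' := cache.insert [a1, q2] (pvCsL tr isd a1 q2) with hcache'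
        have hC' : pvInvC tr isd cache' := by
          intro x y v hv
          rw [hcache', PySem.Dict.get?_insert] at hv
          by_cases hxy : [x, y] = ([a1, q2] : List Int)
          · have hx : x = a1 ∧ y = q2 := by
              simpa using hxy
            rw [if_pos hxy] at hv
            cases hv
            rw [hx.1, hx.2]
          · rw [if_neg hxy] at hv
            exact hC x y v hv
        have hgd : cache'.getD [a1, q2] [] = pvCsL tr isd a1 q2 := by
          rw [hcache', PySem.Dict.getD_insert]
          simp
        have hfold : (((PySem.Dict.mk tr).getD [a1, q2] []).flatMap
            (fun a2 => (PySem.Dict.mk isd).getD a2 [])) = pvCsL tr isd a1 q2 := rfl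
        rw [hfold, hgd]
        obtain ⟨h1, h2⟩ := ih (PySem.Set.update s (pvCsL tr isd a1 q2)) cache' hC'
        refine ⟨?_, h2⟩
        rw [h1]
        show _ = PySem.Set.update s (pvCsL tr isd a1 q2 ++ rest.flatMap _)
        show _ = (pvCsL tr isd a1 q2 ++ rest.flatMap _).foldl PySem.Set.add s
        rw [List.foldl_append]
        rfl

-- A's per-query body equals pvFA
lemma pv_A_body (tr : List (List Int × List Int)) (isd : List (Int × List Int)) (q : List Int) :
    (((PySem.Dict.mk tr).getD [PySem.List.pyGetD q 0 0, PySem.List.pyGetD q 1 0] []).foldl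
      (fun filters answer_1 =>
        (((PySem.Dict.mk tr).getD [answer_1, PySem.List.pyGetD q 2 0] []).foldl
          (fun filters answer_2 =>
            (((PySem.Dict.mk isd).getD answer_2 []).foldl
              (fun f concept => PySem.Set.add f concept) filters)) filters))
      PySem.Set.empty) = pvFA tr isd q := by
  have hmid : ∀ (a1 : Int) (f : PySem.Set Int),
      (((PySem.Dict.mk tr).getD [a1, PySem.List.pyGetD q 2 0] []).foldl
        (fun filters answer_2 =>
          (((PySem.Dict.mk isd).getD answer_2 []).foldl
            (fun f concept => PySem.Set.add f concept) filters)) f)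
      = PySem.Set.update f (pvCsL tr isd a1 (PySem.List.pyGetD q 2 0)) := by
    intro a1 f
    exact pv_foldl_update (fun a2 => (PySem.Dict.mk isd).getD a2 []) _ f
  calc (((PySem.Dict.mk tr).getD [PySem.List.pyGetD q 0 0, PySem.List.pyGetD q 1 0] []).foldl
          (fun filters answer_1 =>
            (((PySem.Dict.mk tr).getD [answer_1, PySem.List.pyGetD q 2 0] []).foldl
              (fun filters answer_2 =>
                (((PySem.Dict.mk isd).getD answer_2 []).foldl
                  (fun f concept => PySem.Set.add f concept) filters)) filters))
          PySem.Set.empty)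
      = (((PySem.Dict.mk tr).getD [PySem.List.pyGetD q 0 0, PySem.List.pyGetD q 1 0] []).foldl
          (fun filters a1 => PySem.Set.update filters (pvCsL tr isd a1 (PySem.List.pyGetD q 2 0)))
          PySem.Set.empty) := by
        have hfun : (fun (filters : PySem.Set Int) answer_1 =>
            (((PySem.Dict.mk tr).getD [answer_1, PySem.List.pyGetD q 2 0] []).foldl
              (fun filters answer_2 =>
                (((PySem.Dict.mk isd).getD answer_2 []).foldl
                  (fun f concept => PySem.Set.add f concept) filters)) filters))
            = (fun (filters : PySem.Set Int) a1 =>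
                PySem.Set.update filters (pvCsL tr isd a1 (PySem.List.pyGetD q 2 0))) := by
          funext f a1
          exact hmid a1 f
        rw [hfun]
    _ = pvFA tr isd q := pv_foldl_update (fun a1 => pvCsL tr isd a1 (PySem.List.pyGetD q 2 0)) _ _

-- main fold lemma
lemma pv_main (tr : List (List Int × List Int)) (isd : List (Int × List Int)) :
    ∀ (te : List (List Int)) (ret : PySem.Dict (List Int) (List Int))
      (cache : PySem.Dict (List Int) (List Int)),
      ret.keys.Nodup →
      (∀ k v, ret.get? k = some v → v = pvFA tr isd k) →
      pvInvC tr isd cache →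
      (te.foldl (fun (st : PySem.Dict (List Int) (List Int) × PySem.Dict (List Int) (List Int)) q =>
          if st.1.contains q then st
          else
            let q2 := PySem.List.pyGetD q 2 0
            let inner := ((PySem.Dict.mk tr).getD [PySem.List.pyGetD q 0 0, PySem.List.pyGetD q 1 0] []).foldl
              (fun (p : PySem.Set Int × PySem.Dict (List Int) (List Int)) a1 =>
                let key := [a1, q2]
                let cache := if p.2.contains key then p.2
                  else p.2.insert key (((PySem.Dict.mk tr).getD key []).flatMap
                                         (fun a2 => (PySem.Dict.mk isd).getD a2 []))
                (PySem.Set.update p.1 (cache.getD key []), cache))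
              (PySem.Set.empty, st.2)
            (st.1.insert q inner.1, inner.2))
        (ret, cache)).1
      = te.foldl (fun (ret : PySem.Dict (List Int) (List Int)) query_test =>
          let q0 := PySem.List.pyGetD query_test 0 0
          let q1 := PySem.List.pyGetD query_test 1 0
          let q2 := PySem.List.pyGetD query_test 2 0
          let answers_1 := (PySem.Dict.mk tr).getD [q0, q1] []
          let filters : PySem.Set Int :=
            answers_1.foldl (fun filters answer_1 =>
              let answers_2 := (PySem.Dict.mk tr).getD [answer_1, q2] []
              answers_2.foldl (fun filters answer_2 =>
                let concepts := (PySem.Dict.mk isd).getD answer_2 []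
                concepts.foldl (fun f concept => PySem.Set.add f concept) filters) filters)
              PySem.Set.empty
          ret.insert query_test filters) ret := by
  intro te
  induction te with
  | nil => intro ret cache _ _ _; rfl
  | cons q rest ih =>
      intro ret cache hn hR hC
      simp only [List.foldl_cons]
      rw [pv_A_body tr isd q]
      by_cases hq : ret.contains q
      · -- duplicate query: B skips, A re-inserts the same value
        have hsome : ∃ v, ret.get? q = some v := by
          rw [PySem.Dict.contains_eq_isSome_get?] at hq
          exact Option.isSome_iff_exists.mp hq
        obtain ⟨v, hv⟩ := hsome
        have hveq : v = pvFA tr isd q := hR q v hv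
        have hins : ret.insert q (pvFA tr isd q) = ret := by
          rw [← hveq]; exact pv_insert_same hn hv
        simp only [hq, if_pos]
        rw [hins]
        exact ih ret cache hn hR hC
      · have hq' : ret.contains q = false := by simpa using hq
        simp only [hq', Bool.false_eq_true, if_false]
        obtain ⟨h1, h2⟩ := pv_inner tr isd (PySem.List.pyGetD q 2 0)
          ((PySem.Dict.mk tr).getD [PySem.List.pyGetD q 0 0, PySem.List.pyGetD q 1 0] [])
          PySem.Set.empty cache hC
        rw [h1]
        have hfa : (PySem.Set.update PySem.Set.empty
            (((PySem.Dict.mk tr).getD [PySem.List.pyGetD q 0 0, PySem.List.pyGetD q 1 0] []).flatMap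
              (fun a1 => pvCsL tr isd a1 (PySem.List.pyGetD q 2 0)))) = pvFA tr isd q := rfl
        rw [hfa]
        apply ih
        · exact PySem.Dict.nodup_keys_insert _ _ _ hn
        · intro k v hv
          rw [PySem.Dict.get?_insert] at hv
          by_cases hk : k = q
          · rw [if_pos hk] at hv
            cases hv
            rw [hk]
          · rw [if_neg hk] at hv
            exact hR k v hv
        · exact h2

-- ===== VERDICT (by name: the statement is the Claim_ definition above) =====
theorem get_test_filter_c_2p_spec : Claim_equal_get_test_filter_c_2p := by
  unfold Claim_equal_get_test_filter_c_2p
  intro tr te isd _ _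
  unfold Spec_get_test_filter_c_2p get_test_filter_c_2p get_test_filter_c_2p_alt
  rw [pv_main tr isd te PySem.Dict.empty PySem.Dict.empty]
  · exact PySem.Dict.nodup_keys_empty
  · intro k v hv
    rw [PySem.Dict.get?_empty] at hv
    cases hv
  · intro x y v hv
    rw [PySem.Dict.get?_empty] at hv
    cases hv
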